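-- pv_equiv track=rewrite | github.com/vkg14/AdventOfCode | 2024_py/24.py | search_part_one
-- ===== SOURCE A (Python) =====
-- from collections import defaultdict, Counter, deque
--
-- def search_part_one(values, gate_type, deps):
--     output_gate_deps = defaultdict(set)
--
--     def dfs(cur):
--         if not any(cur.startswith(sw) for sw in 'xyz'):
--             output_gate_deps[node].add(cur)
--
--         if cur in values:
--             return values[cur]
--
--         v1, v2 = [dfs(nxt) for nxt in deps[cur]]
--         if gate_type[cur] == 'XOR':
--             ret = v1 ^ v2
--         elif gate_type[cur] == 'AND':
--             ret = v1 & v2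
--         else:
--             assert gate_type[cur] == 'OR', f"Unknown gate {gate_type[cur]}"
--             ret = v1 | v2
--
--         values[cur] = ret
--         return ret
--
--     for node in deps.keys():
--         if node.startswith('z'):
--             dfs(node)
--
--     return values, output_gate_deps
-- ===== SOURCE B (Python) =====
-- def search_part_one(values, gate_type, deps):
--     # Iterative DFS with an explicit stack of (gate, ready) frames instead of
--     # recursion; mutates `values` in place exactly like the original.
--     output_gate_deps = {}
--     for node in deps:
--         if not node.startswith('z'):
--             continue
--         stack = [(node, False)]
--         while stack:
--             cur, ready = stack.pop()
--             if ready: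
--                 v1, v2 = (values[c] for c in deps[cur])
--                 op = gate_type[cur]
--                 values[cur] = v1 ^ v2 if op == 'XOR' else v1 & v2 if op == 'AND' else v1 | v2
--             else:
--                 if not cur.startswith(('x', 'y', 'z')):
--                     output_gate_deps.setdefault(node, set()).add(cur)
--                 if cur in values:
--                     continue
--                 stack.append((cur, True))
--                 for c in reversed(deps[cur]):
--                     stack.append((c, False))
--     return values, output_gate_deps
-- ===== Notes on version B (the rewrite author's own statement) =====
-- stated objective: alternative
-- what changed: The recursive memoized DFS closure is replaced by an iterative DFS over an explicit stack of (gate, ready) frames per z-node, preserving child evaluation order and the add-before-cache-check dependency recording.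
import Mathlib
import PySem

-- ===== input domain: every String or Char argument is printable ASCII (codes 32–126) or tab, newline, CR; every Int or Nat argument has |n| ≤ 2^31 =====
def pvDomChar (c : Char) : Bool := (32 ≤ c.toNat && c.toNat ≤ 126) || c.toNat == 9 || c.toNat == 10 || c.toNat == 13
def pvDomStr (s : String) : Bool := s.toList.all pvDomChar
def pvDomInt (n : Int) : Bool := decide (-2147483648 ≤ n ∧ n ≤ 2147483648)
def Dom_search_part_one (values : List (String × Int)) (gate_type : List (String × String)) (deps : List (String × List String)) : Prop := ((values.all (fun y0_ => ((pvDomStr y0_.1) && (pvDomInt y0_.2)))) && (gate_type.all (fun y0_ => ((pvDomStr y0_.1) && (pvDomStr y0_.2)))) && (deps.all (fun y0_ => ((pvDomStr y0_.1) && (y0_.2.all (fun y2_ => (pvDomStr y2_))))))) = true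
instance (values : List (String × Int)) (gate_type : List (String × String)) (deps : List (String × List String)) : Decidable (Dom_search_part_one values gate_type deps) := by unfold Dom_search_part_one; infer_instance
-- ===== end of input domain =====

-- B replaces A's recursive memoized DFS closure by an iterative DFS over an explicit
-- stack of (gate, ready) frames, same cost (objective: alternative). Like A, B mutates
-- the `values` dict in place; the equivalence proved here is about the return value.

-- ===== PORT A =====
-- State threaded through the traversal: (values, output_gate_deps).
abbrev pvSt : Type := PySem.Dict String Int × PySem.Dict String (List String)

-- Shared by both ports: A's `any(cur.startswith(sw) for sw in 'xyz')` = B's `cur.startswith(('x','y','z'))`.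
def pvIsXYZ (cur : String) : Bool := ["x", "y", "z"].any (fun sw => PySem.Str.startswith cur sw)

-- Shared by both ports: `output_gate_deps[node].add(cur)` on a defaultdict(set)
-- (= B's `output_gate_deps.setdefault(node, set()).add(cur)`), guarded by the x/y/z test.
def pvAddDep (node cur : String) (st : pvSt) : pvSt :=
  if pvIsXYZ cur then st
  else (st.1, st.2.modify node [] (fun s => PySem.Set.add s cur))

-- `[dfs(nxt) for nxt in deps[cur]]`: evaluate the children left to right, threading the state.
def dfsChildrenWith (dfs : String → pvSt → Option (Int × pvSt)) :
    List String → pvSt → Option (List Int × pvSt)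
  | [], st => some ([], st)
  | n :: rest, st =>
    match dfs n st with
    | none => none
    | some (v, st') =>
      match dfsChildrenWith dfs rest st' with
      | none => none
      | some (vs, st'') => some (v :: vs, st'')

-- A's recursive `dfs`, with a fuel argument for termination (never exhausted on Pre_ inputs);
-- `none` is exactly a Python exception (KeyError / unpacking ValueError / failed assert / infinite recursion).
def dfsA (dd : PySem.Dict String (List String)) (gd : PySem.Dict String String)
    (node : String) : Nat → String → pvSt → Option (Int × pvSt)
  | 0, _, _ => none
  | f + 1, cur, st =>
    let st1 := pvAddDep node cur st
    match st1.1.get? cur with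
    | some v => some (v, st1)
    | none =>
      match dd.get? cur with
      | none => none
      | some l =>
        match dfsChildrenWith (dfsA dd gd node f) l st1 with
        | none => none
        | some (vs, st2) =>
          match vs with
          | [v1, v2] =>
            match gd.get? cur with
            | none => none
            | some g =>
              if g = "XOR" then
                let ret := PySem.Int.bxor v1 v2
                some (ret, (st2.1.insert cur ret, st2.2))
              else if g = "AND" then
                let ret := PySem.Int.band v1 v2
                some (ret, (st2.1.insert cur ret, st2.2))
              else if g = "OR" then
                let ret := PySem.Int.bor v1 v2
                some (ret, (st2.1.insert cur ret, st2.2))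
              else none
          | _ => none

-- `for node in deps.keys(): if node.startswith('z'): dfs(node)`
def pvLoopA (dd : PySem.Dict String (List String)) (gd : PySem.Dict String String) :
    List String → pvSt → Option pvSt
  | [], st => some st
  | node :: rest, st =>
    if PySem.Str.startswith node "z" then
      match dfsA dd gd node (dd.size + 2) node st with
      | none => none
      | some (_, st') => pvLoopA dd gd rest st'
    else pvLoopA dd gd rest st

def search_part_one (values : List (String × Int)) (gate_type : List (String × String)) (deps : List (String × List String)) : (List (String × Int)) × (List (String × List String)) :=
  let vd := PySem.Dict.ofList values
  let gd := PySem.Dict.ofList gate_type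
  let dd := PySem.Dict.ofList deps
  match pvLoopA dd gd dd.keys (vd, PySem.Dict.empty) with
  | some st => (st.1.items, st.2.items)
  | none => ([], [])

-- ===== PORT B =====
-- B's inner `while stack:` loop for one z-node; frames are (gate, ready), head = top of stack.
-- Fuel again only makes the loop total; `none` is a Python exception in B.
def runB (dd : PySem.Dict String (List String)) (gd : PySem.Dict String String)
    (node : String) : Nat → List (String × Bool) → pvSt → Option pvSt
  | _, [], st => some st
  | 0, _ :: _, _ => none
  | f + 1, (cur, ready) :: stack, st =>
    if ready then
      match dd.get? cur with
      | some [c1, c2] =>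
        match st.1.get? c1, st.1.get? c2 with
        | some v1, some v2 =>
          match gd.get? cur with
          | some op =>
            let ret := if op = "XOR" then PySem.Int.bxor v1 v2
                       else if op = "AND" then PySem.Int.band v1 v2
                       else PySem.Int.bor v1 v2
            runB dd gd node f stack (st.1.insert cur ret, st.2)
          | none => none
        | _, _ => none
      | _ => none
    else
      let st1 := pvAddDep node cur st
      if st1.1.contains cur then runB dd gd node f stack st1
      else
        match dd.get? cur with
        | none => none
        | some l =>
          -- `stack.append((cur, True)); for c in reversed(deps[cur]): stack.append((c, False))`
          runB dd gd node f (l.reverse.foldl (fun s c => (c, false) :: s) ((cur, true) :: stack)) st1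

-- `for node in deps: if node.startswith('z'): <run the stack loop>`
def pvLoopB (dd : PySem.Dict String (List String)) (gd : PySem.Dict String String) :
    List String → pvSt → Option pvSt
  | [], st => some st
  | node :: rest, st =>
    if PySem.Str.startswith node "z" then
      match runB dd gd node (3 ^ (dd.size + 2) + 1) [(node, false)] st with
      | none => none
      | some st' => pvLoopB dd gd rest st'
    else pvLoopB dd gd rest st

def search_part_one_alt (values : List (String × Int)) (gate_type : List (String × String)) (deps : List (String × List String)) : (List (String × Int)) × (List (String × List String)) :=
  let vd := PySem.Dict.ofList values
  let gd := PySem.Dict.ofList gate_type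
  let dd := PySem.Dict.ofList deps
  match pvLoopB dd gd dd.keys (vd, PySem.Dict.empty) with
  | some st => (st.1.items, st.2.items)
  | none => ([], [])

-- ===== PRECONDITION & SPEC =====
-- `pvGood vd gd dd r n`: gate n evaluates within recursion depth r from the initial
-- values vd: either already valued, or a binary gate with a known op whose two
-- children are good at depth r-1. A rank of dd.size suffices for any evaluable gate.
def pvGood (vd : PySem.Dict String Int) (gd : PySem.Dict String String)
    (dd : PySem.Dict String (List String)) : Nat → String → Bool
  | 0, n => vd.contains n
  | r + 1, n =>
    vd.contains n ||
      (match dd.get? n with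
       | some [a, b] =>
         (decide (gd.get? n = some "XOR" ∨ gd.get? n = some "AND" ∨ gd.get? n = some "OR"))
           && pvGood vd gd dd r a && pvGood vd gd dd r b
       | _ => false)

-- Pre_ = exactly the inputs on which A returns: every z-gate listed in deps is evaluable
-- (acyclic, every reached unvalued gate has exactly two deps and an XOR/AND/OR type);
-- elsewhere A raises (KeyError / ValueError / AssertionError / RecursionError).
def Pre_search_part_one (values : List (String × Int)) (gate_type : List (String × String)) (deps : List (String × List String)) : Prop :=
  ∀ node ∈ (PySem.Dict.ofList deps : PySem.Dict String (List String)).keys,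
    PySem.Str.startswith node "z" = true →
      pvGood (PySem.Dict.ofList values) (PySem.Dict.ofList gate_type) (PySem.Dict.ofList deps)
        (PySem.Dict.ofList deps : PySem.Dict String (List String)).size node = true
instance (values : List (String × Int)) (gate_type : List (String × String)) (deps : List (String × List String)) : Decidable (Pre_search_part_one values gate_type deps) := by unfold Pre_search_part_one; infer_instance

def pvWitness_search_part_one : (List (String × Int)) × (List (String × String)) × (List (String × List String)) :=
  ([("x00", 1), ("y00", 0)], [("z00", "XOR"), ("q1", "AND")], [("z00", ["q1", "x00"]), ("q1", ["x00", "y00"])])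

def Spec_search_part_one (values : List (String × Int)) (gate_type : List (String × String)) (deps : List (String × List String)) (out : (List (String × Int)) × (List (String × List String))) : Prop := out = search_part_one_alt values gate_type deps
instance (values : List (String × Int)) (gate_type : List (String × String)) (deps : List (String × List String)) (out : (List (String × Int)) × (List (String × List String))) : Decidable (Spec_search_part_one values gate_type deps out) := by unfold Spec_search_part_one; infer_instance

-- ===== CLAIM (what is proved, stated in full; the proofs are below) =====
def Claim_equal_search_part_one : Prop := ∀ (values : List (String × Int)) (gate_type : List (String × String)) (deps : List (String × List String)), Dom_search_part_one values gate_type deps → Pre_search_part_one values gate_type deps → Spec_search_part_one values gate_type deps (search_part_one values gate_type deps)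

-- ===== LEMMAS AND PROOFS =====

def pvExt (d d' : PySem.Dict String Int) : Prop := ∀ k v, d.get? k = some v → d'.get? k = some v

theorem pvExt_contains {d d' : PySem.Dict String Int} (h : pvExt d d') {k : String}
    (hk : d.contains k = true) : d'.contains k = true := by
  rw [PySem.Dict.contains_eq_isSome_get?] at hk ⊢
  obtain ⟨v, hv⟩ := Option.isSome_iff_exists.mp hk
  rw [h k v hv]; rfl

theorem children_length {dfs : String → pvSt → Option (Int × pvSt)} :
    ∀ {l : List String} {st : pvSt} {vs : List Int} {st2 : pvSt},
      dfsChildrenWith dfs l st = some (vs, st2) → vs.length = l.length := by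
  intro l
  induction l with
  | nil => intro st vs st2 h; simp [dfsChildrenWith] at h; simp [h.1]
  | cons n rest ih =>
    intro st vs st2 h
    unfold dfsChildrenWith at h
    rcases hd : dfs n st with _ | ⟨v, st'⟩ <;> rw [hd] at h
    · simp at h
    · dsimp only at h
      rcases hc : dfsChildrenWith dfs rest st' with _ | ⟨vs', st''⟩ <;> rw [hc] at h
      · simp at h
      · simp at h
        rw [← h.1]
        simp [ih hc]

theorem children_ext {dfs : String → pvSt → Option (Int × pvSt)}
    (H : ∀ cur st v st', dfs cur st = some (v, st') → pvExt st.1 st'.1) :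
    ∀ {l : List String} {st : pvSt} {vs : List Int} {st2 : pvSt},
      dfsChildrenWith dfs l st = some (vs, st2) → pvExt st.1 st2.1 := by
  intro l
  induction l with
  | nil => intro st vs st2 h; simp [dfsChildrenWith] at h; rw [← h.2]; exact fun _ _ hv => hv
  | cons n rest ih =>
    intro st vs st2 h
    unfold dfsChildrenWith at h
    rcases hd : dfs n st with _ | ⟨v, st'⟩ <;> rw [hd] at h
    · simp at h
    · dsimp only at h
      rcases hc : dfsChildrenWith dfs rest st' with _ | ⟨vs', st''⟩ <;> rw [hc] at h
      · simp at h
      · simp at h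
        have h2 := ih hc
        rw [← h.2]
        exact fun k v hv => h2 k v (H _ _ _ _ hd k v hv)

theorem push_eq (l : List String) (acc : List (String × Bool)) :
    l.reverse.foldl (fun s c => (c, false) :: s) acc = l.map (fun c => (c, false)) ++ acc := by
  rw [List.foldl_reverse]
  induction l with
  | nil => rfl
  | cons n rest ih => simp [List.foldr_cons, ih]
theorem pvExt_refl (d : PySem.Dict String Int) : pvExt d d := fun _ _ h => h

theorem pvExt_trans {d d' d'' : PySem.Dict String Int} (h : pvExt d d') (h' : pvExt d' d'') :
    pvExt d d'' := fun k v hk => h' k v (h k v hk)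

theorem pvAddDep_fst (node cur : String) (st : pvSt) : (pvAddDep node cur st).1 = st.1 := by
  unfold pvAddDep; split <;> rfl

theorem dfsA_post (dd : PySem.Dict String (List String)) (gd : PySem.Dict String String)
    (node : String) :
    ∀ (f : Nat) (cur : String) (st : pvSt) (v : Int) (st' : pvSt),
      dfsA dd gd node f cur st = some (v, st') →
        pvExt st.1 st'.1 ∧ st'.1.get? cur = some v := by
  intro f
  induction f with
  | zero => intro cur st v st' h; simp [dfsA] at h
  | succ f ih =>
    intro cur st v st' h
    have hext : ∀ {l : List String} {st : pvSt} {vs : List Int} {st2 : pvSt},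
        dfsChildrenWith (dfsA dd gd node f) l st = some (vs, st2) → pvExt st.1 st2.1 :=
      children_ext (fun cur st v st' hh => (ih cur st v st' hh).1)
    unfold dfsA at h
    dsimp only at h
    rcases hget : (pvAddDep node cur st).1.get? cur with _ | v0 <;> rw [hget] at h
    · rcases hdd : dd.get? cur with _ | l <;> rw [hdd] at h
      · simp at h
      · dsimp only at h
        rcases hc : dfsChildrenWith (dfsA dd gd node f) l (pvAddDep node cur st) with _ | ⟨vs, st2⟩ <;> rw [hc] at h
        · simp at h
        · dsimp only at h
          rcases vs with _ | ⟨v1, _ | ⟨v2, _ | ⟨v3, vrest⟩⟩⟩ <;> dsimp only at h <;>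
            try exact absurd h (by simp)
          rcases hgd : gd.get? cur with _ | g <;> rw [hgd] at h
          · simp at h
          · dsimp only at h
            have hbase : pvExt st.1 st2.1 := by
              have h1 : pvExt st.1 (pvAddDep node cur st).1 := by
                rw [pvAddDep_fst]; exact pvExt_refl _
              exact pvExt_trans h1 (hext hc)
            have hcur : st.1.get? cur = none := by
              rw [← pvAddDep_fst node cur st]; exact hget
            split_ifs at h <;>
              · rw [Option.some.injEq, Prod.mk.injEq] at h
                obtain ⟨hv, hst⟩ := h
                subst hv; subst hst
                refine ⟨fun k w hk => ?_, PySem.Dict.get?_insert_self _ _ _⟩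
                by_cases hkc : k = cur
                · subst hkc; simp [hk] at hcur
                · dsimp only
                  rw [PySem.Dict.get?_insert_of_ne _ _ hkc]; exact hbase k w hk
    · rw [Option.some.injEq, Prod.mk.injEq] at h
      obtain ⟨hv, hst⟩ := h
      subst hv; subst hst
      constructor
      · rw [pvAddDep_fst]; exact pvExt_refl _
      · exact hget
theorem runB_mono (dd : PySem.Dict String (List String)) (gd : PySem.Dict String String)
    (node : String) :
    ∀ (f : Nat) (k : List (String × Bool)) (st : pvSt) (r : pvSt) (f' : Nat),
      runB dd gd node f k st = some r → f ≤ f' → runB dd gd node f' k st = some r := by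
  intro f
  induction f with
  | zero =>
    intro k st r f' h hle
    cases k with
    | nil => cases f' <;> simpa [runB] using h
    | cons fr kk => simp [runB] at h
  | succ f ih =>
    intro k st r f' h hle
    cases k with
    | nil => cases f' <;> simpa [runB] using h
    | cons fr kk =>
      obtain ⟨cur, ready⟩ := fr
      rcases f' with _ | f''
      · omega
      · have hle' : f ≤ f'' := by omega
        simp only [runB] at h ⊢
        cases ready
        · simp only [Bool.false_eq_true, if_false] at h ⊢
          by_cases hc : (pvAddDep node cur st).1.contains cur = true
          · rw [if_pos hc] at h ⊢; exact ih _ _ _ _ h hle'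
          · rw [if_neg hc] at h ⊢
            rcases hdd : dd.get? cur with _ | l <;> (try rw [hdd] at h) <;> (try dsimp only at h) <;> (try dsimp only)
            · exact h
            · exact ih _ _ _ _ h hle'
        · simp only [if_true] at h ⊢
          rcases hdd : dd.get? cur with _ | l <;> (try rw [hdd] at h) <;> (try dsimp only at h) <;> (try dsimp only)
          · exact h
          · rcases l with _ | ⟨c1, _ | ⟨c2, _ | ⟨c3, lr⟩⟩⟩ <;> dsimp only at h ⊢ <;>
              try exact h
            rcases h1 : st.1.get? c1 with _ | v1 <;> (try rw [h1] at h) <;> (try dsimp only at h ⊢) <;> try exact h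
            rcases h2 : st.1.get? c2 with _ | v2 <;> (try rw [h2] at h) <;> (try dsimp only at h ⊢) <;> try exact h
            rcases hgd : gd.get? cur with _ | op <;> (try rw [hgd] at h) <;> (try dsimp only at h ⊢)
            · exact h
            · exact ih _ _ _ _ h hle'
theorem runB_sim (dd : PySem.Dict String (List String)) (gd : PySem.Dict String String)
    (node : String) :
    ∀ (f : Nat) (cur : String) (st : pvSt) (v : Int) (st' : pvSt),
      dfsA dd gd node f cur st = some (v, st') →
        ∀ (k : List (String × Bool)) (g : Nat) (r : pvSt),
          runB dd gd node g k st' = some r →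
          runB dd gd node (3 ^ f + g) ((cur, false) :: k) st = some r := by
  intro f
  induction f with
  | zero => intro cur st v st' h; simp [dfsA] at h
  | succ f ih =>
    intro cur st v st' h k g r hrun
    unfold dfsA at h
    dsimp only at h
    rcases hget : (pvAddDep node cur st).1.get? cur with _ | v0 <;> rw [hget] at h
    · -- not cached: compute case
      have hcontf : (pvAddDep node cur st).1.contains cur = false := by
        rw [PySem.Dict.contains_eq_isSome_get?, hget]; rfl
      rcases hdd : dd.get? cur with _ | l <;> rw [hdd] at h
      · simp at h
      · dsimp only at h
        rcases hc : dfsChildrenWith (dfsA dd gd node f) l (pvAddDep node cur st) with _ | ⟨vs, st2⟩ <;> rw [hc] at h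
        · simp at h
        · dsimp only at h
          rcases vs with _ | ⟨v1, _ | ⟨v2, _ | ⟨v3, vrest⟩⟩⟩ <;> dsimp only at h <;>
            try exact absurd h (by simp)
          have hlen := children_length hc
          rcases l with _ | ⟨c1, _ | ⟨c2, _ | ⟨c3, lr⟩⟩⟩ <;> try simp at hlen
          unfold dfsChildrenWith at hc
          rcases hd1 : dfsA dd gd node f c1 (pvAddDep node cur st) with _ | ⟨w1, stm⟩ <;> rw [hd1] at hc
          · simp at hc
          · dsimp only at hc
            unfold dfsChildrenWith at hc
            rcases hd2 : dfsA dd gd node f c2 stm with _ | ⟨w2, st2'⟩ <;> rw [hd2] at hc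
            · simp at hc
            · dsimp only at hc
              unfold dfsChildrenWith at hc
              dsimp only at hc
              rw [Option.some.injEq, Prod.mk.injEq] at hc
              obtain ⟨hvs, hst2⟩ := hc
              rw [List.cons.injEq] at hvs
              obtain ⟨hw1, hvs⟩ := hvs
              rw [List.cons.injEq] at hvs
              obtain ⟨hw2, -⟩ := hvs
              rw [hw1] at hd1
              rw [hw2, hst2] at hd2
              have hf1 : 1 ≤ f := by
                rcases f with _ | f1
                · simp [dfsA] at hd1
                · omega
              have hp1 := dfsA_post dd gd node f c1 _ _ _ hd1
              have hp2 := dfsA_post dd gd node f c2 _ _ _ hd2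
              have hg1 : st2.1.get? c1 = some v1 := hp2.1 c1 v1 hp1.2
              have hg2 : st2.1.get? c2 = some v2 := hp2.2
              rcases hgd : gd.get? cur with _ | gg <;> rw [hgd] at h
              · simp at h
              · dsimp only at h
                split_ifs at h with hx1 hx2 hx3 <;>
                · rw [Option.some.injEq, Prod.mk.injEq] at h
                  obtain ⟨hv, hst⟩ := h
                  subst hv; subst hst
                  have hC : runB dd gd node (g + 1) ((cur, true) :: k) st2 = some r := by
                    simp only [runB, if_true]
                    rw [hdd]
                    dsimp only
                    rw [hg1, hg2]
                    dsimp only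
                    rw [hgd]
                    dsimp only
                    first
                      | (rw [hx1]; exact hrun)
                      | (rw [hx2]; exact hrun)
                      | (rw [hx3]; exact hrun)
                  have hB := ih c2 stm v2 st2 hd2 ((cur, true) :: k) (g + 1) r hC
                  have hA := ih c1 (pvAddDep node cur st) v1 stm hd1 _ _ r hB
                  have hstep : runB dd gd node ((3 ^ f + (3 ^ f + (g + 1))) + 1)
                      ((cur, false) :: k) st = some r := by
                    simp only [runB, Bool.false_eq_true, if_false]
                    rw [hcontf]
                    simp only [Bool.false_eq_true, if_false]
                    rw [hdd]
                    dsimp only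
                    rw [push_eq]
                    exact hA
                  refine runB_mono dd gd node _ _ _ _ _ hstep ?_
                  have h3 : 3 ^ 1 ≤ 3 ^ f := Nat.pow_le_pow_right (by norm_num) (by omega)
                  have h33 : 3 ^ (f + 1) = 3 * 3 ^ f := by ring
                  omega
    · -- cached
      rw [Option.some.injEq, Prod.mk.injEq] at h
      obtain ⟨hv, hst⟩ := h
      subst hv; subst hst
      have hcont : (pvAddDep node cur st).1.contains cur = true := by
        rw [PySem.Dict.contains_eq_isSome_get?, hget]; rfl
      have hstep : runB dd gd node (g + 1) ((cur, false) :: k) st = some r := by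
        simp only [runB, Bool.false_eq_true, if_false]
        rw [hcont]
        simp only [if_true]
        exact hrun
      refine runB_mono dd gd node _ _ _ _ _ hstep ?_
      have h3 : 1 ≤ 3 ^ (f + 1) := Nat.one_le_pow _ _ (by norm_num)
      omega
theorem dfsA_total (dd : PySem.Dict String (List String)) (gd : PySem.Dict String String)
    (vd : PySem.Dict String Int) (node : String) :
    ∀ (r f : Nat) (cur : String) (st : pvSt),
      pvGood vd gd dd r cur = true →
      (∀ k, vd.contains k = true → st.1.contains k = true) →
      r < f →
      (dfsA dd gd node f cur st).isSome = true := by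
  intro r
  induction r with
  | zero =>
    intro f cur st hg hsub hlt
    rcases f with _ | f
    · omega
    · simp only [pvGood] at hg
      have hcont : (pvAddDep node cur st).1.contains cur = true := by
        rw [pvAddDep_fst]; exact hsub cur hg
      rw [PySem.Dict.contains_eq_isSome_get?] at hcont
      obtain ⟨v, hv⟩ := Option.isSome_iff_exists.mp hcont
      unfold dfsA; dsimp only; rw [hv]; rfl
  | succ r ih =>
    intro f cur st hg hsub hlt
    rcases f with _ | f
    · omega
    · rcases hget : (pvAddDep node cur st).1.get? cur with _ | v0
      · simp only [pvGood] at hg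
        rcases hvd : vd.contains cur with _ | _
        · rw [hvd] at hg
          simp only [Bool.false_or] at hg
          rcases hdd : dd.get? cur with _ | l <;> rw [hdd] at hg
          · simp at hg
          · rcases l with _ | ⟨a, _ | ⟨b, _ | ⟨c, lr⟩⟩⟩ <;> dsimp only at hg <;> try simp at hg
            obtain ⟨⟨hop, hga⟩, hgb⟩ := hg
            have hsub1 : ∀ k, vd.contains k = true → (pvAddDep node cur st).1.contains k = true := by
              intro k hk; rw [pvAddDep_fst]; exact hsub k hk
            have hsa := ih f a (pvAddDep node cur st) hga hsub1 (by omega)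
            obtain ⟨⟨va, sta⟩, hda⟩ := Option.isSome_iff_exists.mp hsa
            have hpa := dfsA_post dd gd node f a _ _ _ hda
            have hsub2 : ∀ k, vd.contains k = true → sta.1.contains k = true := by
              intro k hk; exact pvExt_contains hpa.1 (hsub1 k hk)
            have hsb := ih f b sta hgb hsub2 (by omega)
            obtain ⟨⟨vb, stb⟩, hdb⟩ := Option.isSome_iff_exists.mp hsb
            have hc : dfsChildrenWith (dfsA dd gd node f) [a, b] (pvAddDep node cur st)
                = some ([va, vb], stb) := by
              unfold dfsChildrenWith; rw [hda]; dsimp only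
              unfold dfsChildrenWith; rw [hdb]; dsimp only
              unfold dfsChildrenWith; rfl
            unfold dfsA; dsimp only
            rw [hget, hdd]; dsimp only
            rw [hc]; dsimp only
            rcases hop with hh | hh | hh <;> rw [hh] <;> rfl
        · exfalso
          have := hsub cur hvd
          rw [← pvAddDep_fst node cur st, PySem.Dict.contains_eq_isSome_get?, hget] at this
          simp at this
      · unfold dfsA; dsimp only; rw [hget]; rfl

theorem loop_eq (dd : PySem.Dict String (List String)) (gd : PySem.Dict String String)
    (vd : PySem.Dict String Int) :
    ∀ (keylist : List String) (st : pvSt),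
      (∀ n ∈ keylist, PySem.Str.startswith n "z" = true → pvGood vd gd dd dd.size n = true) →
      (∀ k, vd.contains k = true → st.1.contains k = true) →
      pvLoopA dd gd keylist st = pvLoopB dd gd keylist st := by
  intro keylist
  induction keylist with
  | nil => intro st _ _; rfl
  | cons n rest ih =>
    intro st hg hsub
    have hgrest : ∀ m ∈ rest, PySem.Str.startswith m "z" = true → pvGood vd gd dd dd.size m = true :=
      fun m hm => hg m (List.mem_cons_of_mem _ hm)
    unfold pvLoopA pvLoopB
    rcases hz : PySem.Str.startswith n "z" with _ | _
    · simp only [Bool.false_eq_true, if_false]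
      exact ih st hgrest hsub
    · simp only [if_true]
      have hs := dfsA_total dd gd vd n dd.size (dd.size + 2) n st
        (hg n (List.mem_cons_self) hz) hsub (by omega)
      obtain ⟨⟨v, st'⟩, hd⟩ := Option.isSome_iff_exists.mp hs
      have hsim := runB_sim dd gd n (dd.size + 2) n st v st' hd [] 0 st' rfl
      have hm : runB dd gd n (3 ^ (dd.size + 2) + 1) [(n, false)] st = some st' :=
        runB_mono dd gd n _ _ _ _ _ hsim (by omega)
      rw [hd, hm]
      dsimp only
      have hpost := dfsA_post dd gd n (dd.size + 2) n _ _ _ hd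
      exact ih st' hgrest (fun k hk => pvExt_contains hpost.1 (hsub k hk))
theorem search_part_one_spec : Claim_equal_search_part_one := by
  intro values gate_type deps hdom hpre
  unfold Spec_search_part_one
  unfold search_part_one search_part_one_alt
  dsimp only
  rw [loop_eq (PySem.Dict.ofList deps) (PySem.Dict.ofList gate_type) (PySem.Dict.ofList values)
    (PySem.Dict.ofList deps).keys (PySem.Dict.ofList values, PySem.Dict.empty) hpre
    (fun k hk => hk)]
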